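-- pv_equiv track=rewrite | github.com/ICST-AI-Delivery/Full-pipeline-testcase-generator- | docs/Related FPIs/Picture Analyze Agent/test_fpi_relationship_matrix.py | _has_moderate_dependency
-- ===== SOURCE A (Python) =====
-- def _has_moderate_dependency(fpi1: str, fpi2: str) -> bool:
--     """Check if FPIs have moderate positive relationship"""
--     # Same domain features that work together
--     lighting_fpis = {'VEH-F027', 'VEH-F030', 'VEH-F033', 'VEH-F042', 'VEH-F047', 'VEH-F051', 'VEH-F057', 'VEH-F247'}
--     safety_fpis = {'VEH-F134', 'VEH-F135', 'VEH-F136', 'VEH-F139', 'VEH-F140', 'VEH-F145'}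
--     powertrain_fpis = {'VEH-F803', 'VEH-F804', 'VEH-F810', 'VEH-F869'}
--
--     fpi1_code = fpi1.split('_')[0]
--     fpi2_code = fpi2.split('_')[0]
--
--     for domain_fpis in [lighting_fpis, safety_fpis, powertrain_fpis]:
--         if fpi1_code in domain_fpis and fpi2_code in domain_fpis:
--             return True
--
--     # Telltale management with vehicle systems
--     if 'BC001' in fpi1 and 'VEH-F' in fpi2:
--         return True
--     if 'BC001' in fpi2 and 'VEH-F' in fpi1:
--         return True
--
--     return False
-- ===== SOURCE B (Python) =====
-- # Same-domain relation precomputed as an explicit set of ordered code PAIRS: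
-- # the union of the cartesian squares of the three (disjoint) domain groups.
-- _SAME_DOMAIN_PAIRS = frozenset(
--     (a, b)
--     for group in (
--         ('VEH-F027', 'VEH-F030', 'VEH-F033', 'VEH-F042', 'VEH-F047', 'VEH-F051', 'VEH-F057', 'VEH-F247'),
--         ('VEH-F134', 'VEH-F135', 'VEH-F136', 'VEH-F139', 'VEH-F140', 'VEH-F145'),
--         ('VEH-F803', 'VEH-F804', 'VEH-F810', 'VEH-F869'),
--     )
--     for a in group
--     for b in group
-- )
--
--
-- def _has_moderate_dependency(fpi1: str, fpi2: str) -> bool: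
--     """Check if FPIs have moderate positive relationship"""
--     # Same-domain check is one membership test of the code pair in the relation.
--     if (fpi1.split('_')[0], fpi2.split('_')[0]) in _SAME_DOMAIN_PAIRS:
--         return True
--
--     # Telltale management with vehicle systems
--     if 'BC001' in fpi1 and 'VEH-F' in fpi2:
--         return True
--     if 'BC001' in fpi2 and 'VEH-F' in fpi1:
--         return True
--
--     return False
-- ===== Notes on version B (the rewrite author's own statement) =====
-- stated objective: alternative
-- what changed: Replaces per-call classification of each code (loop over three sets testing both codes' membership) by a module-level precomputed binary relation -- the set of all same-domain ordered code pairs (union of the groups' cartesian squares) -- so the domain check becomes a single membership test of the pair (code1, code2); correct because the groups are disjoint.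
import Mathlib
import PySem

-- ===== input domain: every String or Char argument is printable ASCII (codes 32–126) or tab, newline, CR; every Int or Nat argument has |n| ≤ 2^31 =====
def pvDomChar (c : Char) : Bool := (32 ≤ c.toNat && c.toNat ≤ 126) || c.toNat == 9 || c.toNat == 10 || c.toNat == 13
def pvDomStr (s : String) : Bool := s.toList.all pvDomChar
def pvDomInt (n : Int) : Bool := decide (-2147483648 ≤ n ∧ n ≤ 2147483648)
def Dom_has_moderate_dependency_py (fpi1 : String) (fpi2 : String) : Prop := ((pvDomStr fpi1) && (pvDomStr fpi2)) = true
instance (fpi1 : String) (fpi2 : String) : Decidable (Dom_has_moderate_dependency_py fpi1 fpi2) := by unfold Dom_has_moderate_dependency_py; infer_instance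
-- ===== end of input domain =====

-- B replaces A's per-call domain classification (loop over three sets testing both codes)
-- by one precomputed binary relation: the set of all same-domain ordered code pairs,
-- checked with a single pair membership; objective: alternative (no speed claim).

-- ===== PORT A =====
def pvL : List String := ["VEH-F027", "VEH-F030", "VEH-F033", "VEH-F042", "VEH-F047", "VEH-F051", "VEH-F057", "VEH-F247"]
def pvS : List String := ["VEH-F134", "VEH-F135", "VEH-F136", "VEH-F139", "VEH-F140", "VEH-F145"]
def pvP : List String := ["VEH-F803", "VEH-F804", "VEH-F810", "VEH-F869"]

def has_moderate_dependency_py (fpi1 : String) (fpi2 : String) : Bool :=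
  let lighting_fpis : PySem.Set String := PySem.Set.ofList pvL
  let safety_fpis : PySem.Set String := PySem.Set.ofList pvS
  let powertrain_fpis : PySem.Set String := PySem.Set.ofList pvP
  -- s.split('_') with a nonempty separator: split? is some and the list is nonempty, so [0] is headD ""
  let fpi1_code := ((PySem.Str.split? fpi1 "_").getD []).headD ""
  let fpi2_code := ((PySem.Str.split? fpi2 "_").getD []).headD ""
  -- the for-loop with early `return True` = any over the three sets in order
  if [lighting_fpis, safety_fpis, powertrain_fpis].any
       (fun domain_fpis => PySem.Set.contains domain_fpis fpi1_code && PySem.Set.contains domain_fpis fpi2_code) then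
    true
  else if PySem.Str.isIn "BC001" fpi1 && PySem.Str.isIn "VEH-F" fpi2 then
    true
  else if PySem.Str.isIn "BC001" fpi2 && PySem.Str.isIn "VEH-F" fpi1 then
    true
  else
    false

-- ===== PORT B =====
-- Source B's module-level groups (tuples) and the generator expression building the
-- pair relation: for group in groups, for a in group, for b in group, yield (a, b);
-- frozenset(...) of those pairs = PySem.Set.ofList of the flatMap list.
def pvGroups : List (List String) :=
  [["VEH-F027", "VEH-F030", "VEH-F033", "VEH-F042", "VEH-F047", "VEH-F051", "VEH-F057", "VEH-F247"],
   ["VEH-F134", "VEH-F135", "VEH-F136", "VEH-F139", "VEH-F140", "VEH-F145"],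
   ["VEH-F803", "VEH-F804", "VEH-F810", "VEH-F869"]]

def pvSameDomainPairs : PySem.Set (String × String) :=
  PySem.Set.ofList (pvGroups.flatMap (fun group => group.flatMap (fun a => group.map (fun b => (a, b)))))

def has_moderate_dependency_py_alt (fpi1 : String) (fpi2 : String) : Bool :=
  if PySem.Set.contains pvSameDomainPairs
       (((PySem.Str.split? fpi1 "_").getD []).headD "", ((PySem.Str.split? fpi2 "_").getD []).headD "") then
    true
  else if PySem.Str.isIn "BC001" fpi1 && PySem.Str.isIn "VEH-F" fpi2 then
    true
  else if PySem.Str.isIn "BC001" fpi2 && PySem.Str.isIn "VEH-F" fpi1 then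
    true
  else
    false

-- ===== PRECONDITION & SPEC =====
def Spec_has_moderate_dependency_py (fpi1 : String) (fpi2 : String) (out : Bool) : Prop := out = has_moderate_dependency_py_alt fpi1 fpi2
instance (fpi1 : String) (fpi2 : String) (out : Bool) : Decidable (Spec_has_moderate_dependency_py fpi1 fpi2 out) := by unfold Spec_has_moderate_dependency_py; infer_instance

-- ===== CLAIM (what is proved, stated in full; the proofs are below) =====
def Claim_equal_has_moderate_dependency_py : Prop := ∀ (fpi1 : String) (fpi2 : String), Dom_has_moderate_dependency_py fpi1 fpi2 → Spec_has_moderate_dependency_py fpi1 fpi2 (has_moderate_dependency_py fpi1 fpi2)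

-- ===== LEMMAS AND PROOFS =====
-- Core fact: for any two codes, A's membership loop over the three sets and B's
-- single pair-relation membership agree.
theorem loop_eq_pair (c1 c2 : String) :
    ([PySem.Set.ofList pvL, PySem.Set.ofList pvS, PySem.Set.ofList pvP].any
        (fun d => PySem.Set.contains d c1 && PySem.Set.contains d c2))
    = PySem.Set.contains pvSameDomainPairs (c1, c2) := by
  rw [Bool.eq_iff_iff]
  simp only [List.any_cons, List.any_nil, Bool.or_false, Bool.or_eq_true, Bool.and_eq_true,
    PySem.Set.contains_iff, PySem.Set.mem_ofList, pvSameDomainPairs, pvGroups,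
    List.mem_flatMap, List.mem_map, Prod.mk.injEq, List.mem_cons, List.not_mem_nil, or_false]
  constructor
  · rintro (h1 | h1 | h1)
    · exact ⟨pvL, Or.inl rfl, c1, h1.1, c2, h1.2, rfl, rfl⟩
    · exact ⟨pvS, Or.inr (Or.inl rfl), c1, h1.1, c2, h1.2, rfl, rfl⟩
    · exact ⟨pvP, Or.inr (Or.inr rfl), c1, h1.1, c2, h1.2, rfl, rfl⟩
  · rintro ⟨g, hg, a, ha, b, hb, rfl, rfl⟩
    rcases hg with rfl | rfl | rfl
    · exact Or.inl ⟨ha, hb⟩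
    · exact Or.inr (Or.inl ⟨ha, hb⟩)
    · exact Or.inr (Or.inr ⟨ha, hb⟩)

-- ===== VERDICT (by name: the statement is the Claim_ definition above) =====
theorem has_moderate_dependency_py_spec : Claim_equal_has_moderate_dependency_py := by
  intro fpi1 fpi2 _
  unfold Spec_has_moderate_dependency_py has_moderate_dependency_py has_moderate_dependency_py_alt
  simp only [loop_eq_pair]
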